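-- pv_equiv track=rewrite | github.com/almatzhezbayev/ubs_solutions | app/routes.py | min_boats_needed
-- ===== SOURCE A (Python) =====
-- def min_boats_needed(intervals):
--     """
--     Find minimum number of boats needed using sweep line algorithm.
--     """
--     if not intervals:
--         return 0
--
--     # Create events: +1 for start, -1 for end
--     events = []
--     for start, end in intervals:
--         events.append((start, 1))    # booking starts
--         events.append((end, -1))     # booking ends
--
--     # Sort events by time, with end events before start events at same time
--     events.sort(key=lambda x: (x[0], x[1]))
--
--     current_boats = 0
--     max_boats = 0
--
--     for _, delta in events:
--         current_boats += delta
--         max_boats = max(max_boats, current_boats)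
--
--     return max_boats
-- ===== SOURCE B (Python) =====
-- def min_boats_needed(intervals):
--     """
--     Direct counting: the peak concurrency is reached just after some booking's
--     start s, where it equals (#starts <= s) - (#ends <= s); take the max over
--     all starts, floored at 0.  No events, no sorting.
--     """
--     best = 0
--     for s, _ in intervals:
--         cur = sum(1 for s2, _ in intervals if s2 <= s) \
--             - sum(1 for _, e2 in intervals if e2 <= s)
--         if cur > best:
--             best = cur
--     return best
-- ===== Notes on version B (the rewrite author's own statement) =====
-- stated objective: alternative
-- what changed: Replaces the build-events/sort/sweep pipeline with a sort-free direct count: the answer is max(0, max over interval starts s of (#starts <= s - #ends <= s)), computed by two membership counts per interval.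
import Mathlib
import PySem

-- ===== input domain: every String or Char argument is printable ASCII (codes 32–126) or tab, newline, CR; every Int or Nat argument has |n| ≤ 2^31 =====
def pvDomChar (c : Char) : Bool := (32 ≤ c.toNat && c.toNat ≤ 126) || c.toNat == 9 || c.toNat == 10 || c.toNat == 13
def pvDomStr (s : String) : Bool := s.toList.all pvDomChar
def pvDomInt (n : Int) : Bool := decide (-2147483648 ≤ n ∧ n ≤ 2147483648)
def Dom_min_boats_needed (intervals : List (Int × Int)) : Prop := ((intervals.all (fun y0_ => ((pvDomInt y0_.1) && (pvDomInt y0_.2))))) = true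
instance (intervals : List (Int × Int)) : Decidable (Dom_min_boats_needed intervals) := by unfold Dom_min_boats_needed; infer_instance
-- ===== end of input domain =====

-- B replaces A's build-events/sort/sweep pipeline with a sort-free direct count
-- (max over interval starts s of #starts ≤ s − #ends ≤ s, floored at 0); same result, not faster.


-- ===== PORT A =====
-- literal transliteration of A: early return on [], build events (two appends per
-- interval), sort by (time, delta) so ends come before starts at ties, then sweep.
def min_boats_needed (intervals : List (Int × Int)) : Int :=
  if intervals = [] then 0
  else
    let events := intervals.foldl
      (fun acc p => (acc ++ [(p.1, (1 : Int))]) ++ [(p.2, (-1 : Int))]) []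
    let sortedEvents := PySem.List.sorted2 events Prod.fst Prod.snd
    let r := sortedEvents.foldl
      (fun (st : Int × Int) e => (st.1 + e.2, max st.2 (st.1 + e.2))) (0, 0)
    r.2

-- ===== PORT B =====
-- literal transliteration of Source B: for each interval start s, count starts ≤ s and
-- ends ≤ s over the whole list; keep the best difference (init 0).
def min_boats_needed_alt (intervals : List (Int × Int)) : Int :=
  intervals.foldl
    (fun best p =>
      let cur : Int :=
        (intervals.map (fun q => if q.1 ≤ p.1 then (1 : Int) else 0)).sum
        - (intervals.map (fun q => if q.2 ≤ p.1 then (1 : Int) else 0)).sum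
      if cur > best then cur else best)
    0

-- ===== PRECONDITION & SPEC =====
def Spec_min_boats_needed (intervals : List (Int × Int)) (out : Int) : Prop := out = min_boats_needed_alt intervals
instance (intervals : List (Int × Int)) (out : Int) : Decidable (Spec_min_boats_needed intervals out) := by unfold Spec_min_boats_needed; infer_instance

-- ===== CLAIM (what is proved, stated in full; the proofs are below) =====
def Claim_equal_min_boats_needed : Prop := ∀ (intervals : List (Int × Int)), Dom_min_boats_needed intervals → Spec_min_boats_needed intervals (min_boats_needed intervals)

-- ===== LEMMAS AND PROOFS =====

-- the event list A builds, in flatMap form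
def eventsOf (l : List (Int × Int)) : List (Int × Int) :=
  l.flatMap (fun p => [(p.1, (1 : Int)), (p.2, (-1 : Int))])

-- the strict "before" predicate sorted2 uses on events (lex on (fst, snd))
def blt (a b : Int × Int) : Bool :=
  decide (a.1 < b.1) || (!decide (b.1 < a.1) && decide (a.2 < b.2))

-- signed count of events at time ≤ s
def cnt (l : List (Int × Int)) (s : Int) : Int :=
  ((l.filter (fun e => decide (e.1 ≤ s))).map Prod.snd).sum

-- running max over the start events, scored by c
def gfold (c : Int → Int) (a : Int) (S : List (Int × Int)) : Int :=
  S.foldl (fun acc e => if e.2 = 1 then max acc (c e.1) else acc) a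

-- prefix-max of the sweep
def M (c : Int) : List (Int × Int) → Int
  | [] => c
  | e :: L => max (c + e.2) (M (c + e.2) L)

theorem sweep_eq_M (L : List (Int × Int)) : ∀ c m : Int, c ≤ m →
    (L.foldl (fun (st : Int × Int) e => (st.1 + e.2, max st.2 (st.1 + e.2))) (c, m)).2
      = max m (M c L) := by
  induction L with
  | nil => intro c m h; simp [M, max_eq_left h]
  | cons e L ih =>
    intro c m h
    simp only [List.foldl_cons, M]
    rw [ih (c + e.2) (max m (c + e.2)) (le_max_right _ _)]
    rw [max_assoc]

theorem M_shift (L : List (Int × Int)) : ∀ c : Int, M c L = c + M 0 L := by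
  induction L with
  | nil => intro c; simp [M]
  | cons e L ih =>
    intro c
    simp only [M]
    rw [ih (c + e.2), ih (0 + e.2)]
    omega

theorem blt_asymm (a b : Int × Int) : blt a b = true → blt b a = false := by
  simp only [blt]; intro h; simp at h ⊢; omega

theorem blt_trans (a b c : Int × Int) : blt a b = true → blt b c = true → blt a c = true := by
  simp only [blt]; intro h1 h2; simp at h1 h2 ⊢; omega

theorem pairwise_insertBy (x : Int × Int) (ys : List (Int × Int))
    (h : ys.Pairwise (fun a b => blt b a = false)) :
    (PySem.List.insertBy blt x ys).Pairwise (fun a b => blt b a = false) := by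
  induction ys with
  | nil => simp [PySem.List.insertBy]
  | cons y ys ih =>
    rcases List.pairwise_cons.1 h with ⟨hy, hys⟩
    by_cases hxy : blt x y = true
    · simp only [PySem.List.insertBy, hxy, if_true]
      refine List.pairwise_cons.2 ⟨?_, h⟩
      intro z hz
      rcases List.mem_cons.1 hz with rfl | hz
      · exact blt_asymm _ _ hxy
      · -- blt z x must be false: else blt z y via transitivity, contradicting hy
        by_contra hzx
        have hzx' : blt z x = true := by revert hzx; cases blt z x <;> simp
        have := blt_trans z x y hzx' hxy
        have := hy z hz
        simp_all
    · simp only [PySem.List.insertBy, hxy]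
      refine List.pairwise_cons.2 ⟨?_, ih hys⟩
      intro z hz
      rcases (PySem.List.mem_insertBy (before := blt) (x := x) (ys := ys) (y := z)).1 hz
        with rfl | hz
      · revert hxy; cases blt z y <;> simp
      · exact hy z hz

theorem foldl_insertBy_pairwise (xs : List (Int × Int)) :
    ∀ acc : List (Int × Int), acc.Pairwise (fun a b => blt b a = false) →
      (xs.foldl (fun acc x => PySem.List.insertBy blt x acc) acc).Pairwise
        (fun a b => blt b a = false) := by
  induction xs with
  | nil => intro acc hacc; simpa using hacc
  | cons x xs ih =>
    intro acc hacc
    simp only [List.foldl_cons]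
    exact ih _ (pairwise_insertBy x acc hacc)

theorem sorted2_pairwise_blt (xs : List (Int × Int)) :
    (PySem.List.sorted2 xs Prod.fst Prod.snd).Pairwise (fun a b => blt b a = false) :=
  foldl_insertBy_pairwise xs [] (by simp)

-- fold lemmas for gfold
theorem gfold_cons (c : Int → Int) (a : Int) (e : Int × Int) (S : List (Int × Int)) :
    gfold c a (e :: S) = gfold c (if e.2 = 1 then max a (c e.1) else a) S := by
  simp only [gfold, List.foldl_cons]

theorem gfold_init_le (c : Int → Int) (S : List (Int × Int)) : ∀ a : Int, a ≤ gfold c a S := by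
  induction S with
  | nil => intro a; simp [gfold]
  | cons e S ih =>
    intro a
    rw [gfold_cons]
    refine le_trans ?_ (ih _)
    split <;> simp

theorem gfold_max (c : Int → Int) (S : List (Int × Int)) :
    ∀ a b : Int, gfold c (max a b) S = max (gfold c a S) b := by
  induction S with
  | nil => intro a b; simp [gfold]
  | cons e S ih =>
    intro a b
    rw [gfold_cons, gfold_cons]
    split
    · rw [show max (max a b) (c e.1) = max (max a (c e.1)) b by rw [max_right_comm]]
      exact ih _ _
    · exact ih _ _

theorem gfold_shift (c : Int → Int) (d : Int) (S : List (Int × Int)) :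
    ∀ a : Int, gfold (fun s => c s + d) a S = gfold c (a - d) S + d := by
  induction S with
  | nil => intro a; simp [gfold]
  | cons e S ih =>
    intro a
    rw [gfold_cons, gfold_cons]
    split
    · rw [ih]
      rw [show max a (c e.1 + d) - d = max (a - d) (c e.1) by omega]
    · exact ih _

theorem gfold_mem_le (c : Int → Int) (S : List (Int × Int)) (x : Int × Int)
    (hx : x ∈ S) (h1 : x.2 = 1) : ∀ a : Int, c x.1 ≤ gfold c a S := by
  induction S with
  | nil => cases hx
  | cons e S ih =>
    intro a
    rw [gfold_cons]
    rcases List.mem_cons.1 hx with rfl | hx'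
    · rw [if_pos h1]
      exact le_trans (le_max_right _ _) (gfold_init_le c S _)
    · exact ih hx' _

theorem gfold_congr (c c' : Int → Int) (S : List (Int × Int))
    (h : ∀ f ∈ S, f.2 = 1 → c f.1 = c' f.1) :
    ∀ a : Int, gfold c a S = gfold c' a S := by
  induction S with
  | nil => intro a; simp [gfold]
  | cons e S ih =>
    intro a
    rw [gfold_cons, gfold_cons]
    have ih' := ih (fun f hf => h f (List.mem_cons_of_mem _ hf))
    by_cases h1 : e.2 = 1
    · rw [if_pos h1, if_pos h1, h e (List.mem_cons_self) h1]
      exact ih' _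
    · rw [if_neg h1, if_neg h1]
      exact ih' _

theorem cnt_cons (e : Int × Int) (L : List (Int × Int)) (s : Int) :
    cnt (e :: L) s = (if e.1 ≤ s then e.2 else 0) + cnt L s := by
  simp only [cnt, List.filter_cons]
  split <;> simp_all

-- the main sorted-sweep characterization:
-- on a lex-sorted ±1 event list, the sweep's max equals the per-start signed counts' max
theorem sorted_sweep (S : List (Int × Int))
    (hp : S.Pairwise (fun a b => blt b a = false))
    (hd : ∀ e ∈ S, e.2 = 1 ∨ e.2 = -1) :
    max 0 (M 0 S) = gfold (cnt S) 0 S := by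
  induction S with
  | nil => simp [M, gfold]
  | cons e S ih =>
    rcases List.pairwise_cons.1 hp with ⟨he, hS⟩
    have hd' : ∀ f ∈ S, f.2 = 1 ∨ f.2 = -1 := fun f hf => hd f (List.mem_cons_of_mem _ hf)
    have ihe := ih hS hd'
    have hfle : ∀ f ∈ S, e.1 ≤ f.1 := by
      intro f hf
      have h := he f hf
      simp only [blt] at h
      simp at h
      omega
    have hM : max 0 (M 0 (e :: S)) = max 0 (e.2 + max 0 (M 0 S)) := by
      simp only [M]
      rw [M_shift S (0 + e.2)]
      omega
    have hcnt : ∀ f ∈ S, f.2 = 1 → cnt (e :: S) f.1 = cnt S f.1 + e.2 := by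
      intro f hf h1
      rw [cnt_cons, if_pos (hfle f hf)]
      omega
    rcases hd e (List.mem_cons_self) with h1 | h1
    · -- e is a start event (delta = 1)
      rw [gfold_cons, if_pos h1]
      have hce : cnt (e :: S) e.1 = 1 + cnt S e.1 := by
        rw [cnt_cons, if_pos le_rfl, h1]
      set c₀ : Int := cnt S e.1 with hc₀
      rw [gfold_congr (cnt (e :: S)) (fun s => cnt S s + 1) S
            (by intro f hf hf1; rw [hcnt f hf hf1, h1])]
      rw [hce]
      rw [gfold_shift (cnt S) 1 S]
      rw [show max 0 (1 + c₀) - 1 = max (-1) c₀ by omega]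
      rw [gfold_max (cnt S) S (-1) c₀]
      set F : Int := gfold (cnt S) (-1) S with hF
      have hmx := gfold_max (cnt S) S (-1) 0
      rw [show max (-1) (0 : Int) = 0 by omega] at hmx
      -- c₀ ≥ 0, and if c₀ > 0 then (e.1, 1) occurs in S so c₀ ≤ F
      have hfilter : ∀ f ∈ S.filter (fun f => decide (f.1 ≤ e.1)), f = (e.1, 1) := by
        intro f hf
        rcases List.mem_filter.1 hf with ⟨hfS, hfle'⟩
        have h1' : f.1 ≤ e.1 := by simpa using hfle'
        have h2' : e.1 ≤ f.1 := hfle f hfS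
        have heq : f.1 = e.1 := le_antisymm h1' h2'
        have h := he f hfS
        simp only [blt] at h
        simp at h
        rcases hd' f hfS with hf1 | hf1
        · exact Prod.ext heq hf1
        · exfalso; rw [h1] at h; omega
      have hc₀len : c₀ = ((S.filter (fun f => decide (f.1 ≤ e.1))).length : Int) := by
        rw [hc₀]
        unfold cnt
        rw [List.sum_eq_card_nsmul _ 1 ?_]
        · simp
        · intro x hx
          rcases List.mem_map.1 hx with ⟨f, hf, rfl⟩
          rw [hfilter f hf]
      have hc₀0 : 0 ≤ c₀ := by rw [hc₀len]; positivity
      have hc₀F : 0 < c₀ → c₀ ≤ F := by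
        intro hpos
        have hne : S.filter (fun f => decide (f.1 ≤ e.1)) ≠ [] := by
          intro hnil
          rw [hc₀len, hnil] at hpos
          simp at hpos
        rcases List.exists_mem_of_ne_nil _ hne with ⟨f, hf⟩
        have hfe : f = (e.1, 1) := hfilter f hf
        have hfS : (e.1, 1) ∈ S := hfe ▸ (List.mem_filter.1 hf).1
        have := gfold_mem_le (cnt S) S (e.1, 1) hfS rfl (-1)
        simpa [← hF, ← hc₀] using this
      rw [hM, h1, ihe, hmx]
      omega
    · -- e is an end event (delta = -1)
      rw [gfold_cons, if_neg (by rw [h1]; decide)]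
      rw [gfold_congr (cnt (e :: S)) (fun s => cnt S s + (-1)) S
            (by intro f hf hf1; rw [hcnt f hf hf1, h1])]
      rw [gfold_shift (cnt S) (-1) S]
      rw [show (0 : Int) - (-1) = max 0 1 by omega, gfold_max]
      rw [hM, h1, ← ihe]
      omega

-- permutation invariance
theorem cnt_perm {S T : List (Int × Int)} (h : S.Perm T) (s : Int) : cnt S s = cnt T s := by
  unfold cnt
  exact ((h.filter _).map _).sum_eq

theorem gfold_perm (c : Int → Int) {S T : List (Int × Int)} (h : S.Perm T) (a : Int) :
    gfold c a S = gfold c a T := by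
  unfold gfold
  refine h.foldl_eq' ?_ a
  intro x _ y _ z
  by_cases hx : x.2 = 1 <;> by_cases hy : y.2 = 1 <;> simp [hx, hy, max_right_comm]

-- bridge to B: the signed event count is B's pair of plain counts
theorem cnt_events (l : List (Int × Int)) (s : Int) :
    cnt (eventsOf l) s =
      (l.map (fun q => if q.1 ≤ s then (1 : Int) else 0)).sum
      - (l.map (fun q => if q.2 ≤ s then (1 : Int) else 0)).sum := by
  induction l with
  | nil => simp [cnt, eventsOf]
  | cons p l ih =>
    simp only [eventsOf, List.flatMap_cons, List.cons_append, List.nil_append] at *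
    rw [cnt_cons, cnt_cons, ih]
    simp only [List.map_cons, List.sum_cons]
    split_ifs <;> omega

theorem gfold_events (c : Int → Int) (l : List (Int × Int)) :
    ∀ a : Int, gfold c a (eventsOf l) = l.foldl (fun acc p => max acc (c p.1)) a := by
  induction l with
  | nil => intro a; simp [gfold, eventsOf]
  | cons p l ih =>
    intro a
    simp only [eventsOf, List.flatMap_cons, List.cons_append, List.nil_append] at *
    rw [gfold_cons, gfold_cons]
    norm_num
    exact ih _

theorem events_build (l : List (Int × Int)) :
    ∀ acc : List (Int × Int),
      l.foldl (fun acc p => (acc ++ [(p.1, (1 : Int))]) ++ [(p.2, (-1 : Int))]) acc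
        = acc ++ eventsOf l := by
  induction l with
  | nil => intro acc; simp [eventsOf]
  | cons p l ih =>
    intro acc
    simp only [List.foldl_cons, eventsOf, List.flatMap_cons] at *
    rw [ih]
    simp

theorem alt_eq_gfold (l : List (Int × Int)) :
    min_boats_needed_alt l = gfold (cnt (eventsOf l)) 0 (eventsOf l) := by
  rw [gfold_events]
  unfold min_boats_needed_alt
  have hfun : (fun (best : Int) (p : Int × Int) =>
      let cur : Int :=
        (l.map (fun q => if q.1 ≤ p.1 then (1 : Int) else 0)).sum
        - (l.map (fun q => if q.2 ≤ p.1 then (1 : Int) else 0)).sum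
      if cur > best then cur else best)
      = fun (acc : Int) (p : Int × Int) => max acc (cnt (eventsOf l) p.1) := by
    funext best p
    rw [cnt_events l p.1]
    simp only []
    split <;> omega
  rw [hfun]

-- ===== VERDICT (by name: the statement is the Claim_ definition above) =====
theorem min_boats_needed_spec : Claim_equal_min_boats_needed := by
  intro l _
  unfold Spec_min_boats_needed
  by_cases hnil : l = []
  · subst hnil; rfl
  · unfold min_boats_needed
    rw [if_neg hnil]
    simp only
    rw [events_build l []]
    simp only [List.nil_append]
    set S := PySem.List.sorted2 (eventsOf l) Prod.fst Prod.snd with hS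
    have hperm : S.Perm (eventsOf l) := PySem.List.sorted2_perm _ _ _ _
    rw [sweep_eq_M S 0 0 le_rfl]
    rw [sorted_sweep S (sorted2_pairwise_blt _) ?hd]
    case hd =>
      intro e he
      have : e ∈ eventsOf l := hperm.mem_iff.1 he
      simp only [eventsOf, List.mem_flatMap] at this
      rcases this with ⟨p, _, hp⟩
      simp only [List.mem_cons, List.not_mem_nil, or_false] at hp
      rcases hp with rfl | rfl
      · left; rfl
      · right; rfl
    have h2 : gfold (cnt S) 0 S = gfold (cnt (eventsOf l)) 0 S :=
      gfold_congr _ _ S (fun f _ _ => cnt_perm hperm f.1) 0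
    rw [h2, gfold_perm _ hperm, ← alt_eq_gfold]
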